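-- pv_equiv track=rewrite | github.com/Aabglov/keras | dialog_parser.py | preTokenize
-- ===== SOURCE A (Python) =====
-- def preTokenize(text):
--     text = text.replace("."," . ")
--     text = text.replace(","," , ")
--     text = text.replace("?"," ? ")
--     text = text.replace("!"," ! ")
--     # Separate numbers into their own entries for vocabulary.
--     # We don't want to have every 3 digit number as its own word.
--     for num in [0,1,2,3,4,5,6,7,8,9]:
--         text = text.replace(str(num)," "+str(num)+" ")
--     return text
-- ===== SOURCE B (Python) =====
-- def preTokenize(text):
--     pad = frozenset('.,?!0123456789')
--     return ''.join(' ' + c + ' ' if c in pad else c for c in text)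
-- ===== Notes on version B (the rewrite author's own statement) =====
-- stated objective: simpler
-- what changed: Replaces A's 14 sequential str.replace passes over the whole string with a single character-by-character scan that wraps any of the 14 pad characters in spaces and joins the parts.
import Mathlib
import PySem

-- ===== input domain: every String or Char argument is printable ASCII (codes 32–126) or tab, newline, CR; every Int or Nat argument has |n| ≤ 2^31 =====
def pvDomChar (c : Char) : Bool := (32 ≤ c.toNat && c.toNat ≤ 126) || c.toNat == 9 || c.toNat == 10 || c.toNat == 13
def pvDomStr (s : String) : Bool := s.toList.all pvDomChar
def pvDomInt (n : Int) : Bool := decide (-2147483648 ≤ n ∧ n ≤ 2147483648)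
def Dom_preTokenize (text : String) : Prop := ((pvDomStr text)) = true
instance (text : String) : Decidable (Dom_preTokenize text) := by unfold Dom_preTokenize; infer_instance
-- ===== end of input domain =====

-- B replaces A's 14 sequential whole-string replace passes by one character scan; objective: simpler.

-- ===== PORT A =====
def preTokenize (text : String) : String :=
  ([0,1,2,3,4,5,6,7,8,9] : List Int).foldl
    (fun t num => PySem.Str.replace t (PySem.Int.toStr num) (" " ++ PySem.Int.toStr num ++ " "))
    (PySem.Str.replace (PySem.Str.replace (PySem.Str.replace
      (PySem.Str.replace text "." " . ") "," " , ") "?" " ? ") "!" " ! ")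

-- ===== PORT B =====
def pvPad : PySem.Set Char := PySem.Set.ofList ".,?!0123456789".toList

def preTokenize_alt (text : String) : String :=
  String.ofList (text.toList.flatMap (fun c => if pvPad.contains c then [' ', c, ' '] else [c]))

-- ===== PRECONDITION & SPEC =====
def Spec_preTokenize (text : String) (out : String) : Prop := out = preTokenize_alt text
instance (text : String) (out : String) : Decidable (Spec_preTokenize text out) := by unfold Spec_preTokenize; infer_instance

-- ===== CLAIM (what is proved, stated in full; the proofs are below) =====
def Claim_equal_preTokenize : Prop := ∀ (text : String), Dom_preTokenize text → Spec_preTokenize text (preTokenize text)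

-- ===== LEMMAS AND PROOFS =====

-- single-character padding step, on the list side
def pvWrap (p : Char) (c : Char) : List Char := if c = p then [' ', p, ' '] else [c]

lemma pv_go_single (p : Char) (new : List Char) :
    ∀ (fuel : Nat) (l acc : List Char), l.length ≤ fuel →
      PySem.Chars.replace.go [p] new fuel l acc
        = acc.reverse ++ l.flatMap (fun c => if c = p then new else [c]) := by
  intro fuel
  induction fuel with
  | zero =>
    intro l acc h
    have : l = [] := List.eq_nil_of_length_eq_zero (Nat.le_zero.mp h)
    subst this
    simp [PySem.Chars.replace.go]
  | succ n ih =>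
    intro l acc h
    cases l with
    | nil => simp [PySem.Chars.replace.go]
    | cons c t =>
      by_cases hc : c = p
      · subst hc
        have hpre : List.isPrefixOf [c] (c :: t) = true := by
          simp [List.isPrefixOf]
        rw [PySem.Chars.replace.go, if_pos hpre]
        simp only [List.length_cons, List.length_nil, Nat.zero_add, List.drop_succ_cons,
          List.drop_zero]
        simp only [List.length_cons] at h
        rw [ih _ _ (by omega)]
        simp
      · have hpre : List.isPrefixOf [p] (c :: t) = false := by
          simp [List.isPrefixOf]
          exact fun h' => (hc h'.symm).elim
        rw [PySem.Chars.replace.go, if_neg (by simp [hpre])]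
        simp only [List.length_cons] at h
        rw [ih _ _ (by omega)]
        simp [hc]

lemma pv_replace_single (p : Char) (new s : List Char) :
    PySem.Chars.replace s [p] new = s.flatMap (fun c => if c = p then new else [c]) := by
  rw [PySem.Chars.replace]
  simp only [List.isEmpty_cons, Bool.false_eq_true, if_false]
  rw [pv_go_single p new s.length s [] (le_refl _)]
  simp

lemma pv_replace_wrap (p : Char) (s : List Char) :
    PySem.Chars.replace s [p] [' ', p, ' '] = s.flatMap (pvWrap p) := by
  rw [pv_replace_single]; rfl

-- composing the 14 single-character passes acts on each character independently
lemma pv_key (c : Char) :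
    ((((((((((((((pvWrap '.' c).flatMap (pvWrap ',')).flatMap (pvWrap '?')).flatMap
      (pvWrap '!')).flatMap (pvWrap '0')).flatMap (pvWrap '1')).flatMap (pvWrap '2')).flatMap
      (pvWrap '3')).flatMap (pvWrap '4')).flatMap (pvWrap '5')).flatMap (pvWrap '6')).flatMap
      (pvWrap '7')).flatMap (pvWrap '8')).flatMap (pvWrap '9'))
      = (if pvPad.contains c then [' ', c, ' '] else [c]) := by
  by_cases h1 : c = '.'; · subst h1; decide
  by_cases h2 : c = ','; · subst h2; decide
  by_cases h3 : c = '?'; · subst h3; decide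
  by_cases h4 : c = '!'; · subst h4; decide
  by_cases h5 : c = '0'; · subst h5; decide
  by_cases h6 : c = '1'; · subst h6; decide
  by_cases h7 : c = '2'; · subst h7; decide
  by_cases h8 : c = '3'; · subst h8; decide
  by_cases h9 : c = '4'; · subst h9; decide
  by_cases h10 : c = '5'; · subst h10; decide
  by_cases h11 : c = '6'; · subst h11; decide
  by_cases h12 : c = '7'; · subst h12; decide
  by_cases h13 : c = '8'; · subst h13; decide
  by_cases h14 : c = '9'; · subst h14; decide
  have hp : c ∉ pvPad := by
    intro hmem
    have h := (PySem.Set.mem_ofList _ _).mp hmem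
    have hl : ".,?!0123456789".toList
        = ['.', ',', '?', '!', '0', '1', '2', '3', '4', '5', '6', '7', '8', '9'] := by decide
    rw [hl] at h
    simp at h
    rcases h with h|h|h|h|h|h|h|h|h|h|h|h|h|h <;> simp_all
  simp [pvWrap, h1, h2, h3, h4, h5, h6, h7, h8, h9, h10, h11, h12, h13, h14, hp]

-- the 14 passes compose to the per-character padding of B
theorem pv_chain (l : List Char) :
    ((((((((((((((l.flatMap (pvWrap '.')).flatMap (pvWrap ',')).flatMap (pvWrap '?')).flatMap
      (pvWrap '!')).flatMap (pvWrap '0')).flatMap (pvWrap '1')).flatMap (pvWrap '2')).flatMap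
      (pvWrap '3')).flatMap (pvWrap '4')).flatMap (pvWrap '5')).flatMap (pvWrap '6')).flatMap
      (pvWrap '7')).flatMap (pvWrap '8')).flatMap (pvWrap '9'))
      = l.flatMap (fun c => if pvPad.contains c then [' ', c, ' '] else [c]) := by
  induction l with
  | nil => simp
  | cons c t ih =>
    simp only [List.flatMap_cons, List.flatMap_append]
    rw [ih, pv_key c]

-- ===== VERDICT (by name: the statement is the Claim_ definition above) =====
set_option maxHeartbeats 800000 in
theorem preTokenize_spec : Claim_equal_preTokenize := by
  intro text _
  unfold Spec_preTokenize preTokenize preTokenize_alt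
  apply String.toList_inj.mp
  simp only [List.foldl]
  have h : ∀ (s : String) (p : Char) (old new : String), old.toList = [p] →
      new.toList = [' ', p, ' '] →
      (PySem.Str.replace s old new).toList = s.toList.flatMap (pvWrap p) := by
    intro s p old new ho hn
    rw [PySem.Str.toList_replace, ho, hn, pv_replace_wrap]
  rw [h _ '9' _ _ (by decide) (by decide), h _ '8' _ _ (by decide) (by decide),
      h _ '7' _ _ (by decide) (by decide), h _ '6' _ _ (by decide) (by decide),
      h _ '5' _ _ (by decide) (by decide), h _ '4' _ _ (by decide) (by decide),
      h _ '3' _ _ (by decide) (by decide), h _ '2' _ _ (by decide) (by decide),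
      h _ '1' _ _ (by decide) (by decide), h _ '0' _ _ (by decide) (by decide),
      h _ '!' _ _ (by decide) (by decide), h _ '?' _ _ (by decide) (by decide),
      h _ ',' _ _ (by decide) (by decide), h _ '.' _ _ (by decide) (by decide),
      String.toList_ofList]
  exact pv_chain text.toList
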